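-- pv_equiv track=rewrite | github.com/igorsterner/acs | acs/minimal_pairs/minimal_pairs.py | count_num_islands
-- ===== SOURCE A (Python) =====
-- def count_num_islands(labels, lang):
--
--     count = 0
--     curr_lang = None
--
--     for idx in range(len(labels)):
--         if labels[idx] == lang:
--             if curr_lang is None:
--                 curr_lang = lang
--         else:
--             if curr_lang == lang:
--                 count += 1
--                 curr_lang = None
--
--     if curr_lang == lang:
--         count += 1
--
--     return count
-- ===== SOURCE B (Python) =====
-- def count_num_islands(labels, lang):
--     # Stage 1: collapse consecutive duplicates into one representative per run
--     # (independent of lang).  Stage 2: count how many runs equal lang.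
--     collapsed = []
--     for x in labels:
--         if not collapsed or collapsed[-1] != x:
--             collapsed.append(x)
--     return collapsed.count(lang)
-- ===== Notes on version B (the rewrite author's own statement) =====
-- stated objective: alternative
-- what changed: Replaces A's one-pass curr_lang state machine that increments on run ends with two lang-independent-then-count stages: first collapse consecutive duplicates into a list of run representatives, then count occurrences of lang in that list.
import Mathlib
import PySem

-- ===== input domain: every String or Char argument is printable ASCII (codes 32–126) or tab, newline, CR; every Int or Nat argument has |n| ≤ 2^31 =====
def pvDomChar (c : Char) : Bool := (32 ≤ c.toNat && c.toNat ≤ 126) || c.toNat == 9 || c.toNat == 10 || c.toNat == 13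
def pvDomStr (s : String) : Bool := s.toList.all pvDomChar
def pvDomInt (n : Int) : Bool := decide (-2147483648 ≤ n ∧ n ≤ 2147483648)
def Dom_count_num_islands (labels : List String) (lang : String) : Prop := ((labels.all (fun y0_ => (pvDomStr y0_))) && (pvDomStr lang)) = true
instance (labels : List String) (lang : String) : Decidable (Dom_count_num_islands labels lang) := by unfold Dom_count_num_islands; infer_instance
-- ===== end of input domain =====

-- B replaces A's curr_lang state machine by two stages: collapse consecutive
-- duplicates into one representative per run, then count occurrences of lang.

-- ===== PORT A =====
-- one loop iteration of A: state is (count, curr_lang)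
def pvStepA (lang : String) (s : Int × Option String) (x : String) : Int × Option String :=
  if x = lang then
    (s.1, if s.2 = none then some lang else s.2)
  else
    if s.2 = some lang then (s.1 + 1, none) else s

def count_num_islands (labels : List String) (lang : String) : Int :=
  let s := labels.foldl (pvStepA lang) (0, none)
  if s.2 = some lang then s.1 + 1 else s.1

-- ===== PORT B =====
-- one iteration of B's collapse loop: append x unless it repeats collapsed[-1]
def pvStepB (acc : List String) (x : String) : List String :=
  if acc.isEmpty ∨ PySem.List.pyGet? acc (-1) ≠ some x then acc ++ [x] else acc

def count_num_islands_alt (labels : List String) (lang : String) : Int :=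
  let collapsed := labels.foldl pvStepB []
  PySem.List.count collapsed lang

-- ===== PRECONDITION & SPEC =====
def Spec_count_num_islands (labels : List String) (lang : String) (out : Int) : Prop := out = count_num_islands_alt labels lang
instance (labels : List String) (lang : String) (out : Int) : Decidable (Spec_count_num_islands labels lang out) := by unfold Spec_count_num_islands; infer_instance

-- ===== CLAIM (what is proved, stated in full; the proofs are below) =====
def Claim_equal_count_num_islands : Prop := ∀ (labels : List String) (lang : String), Dom_count_num_islands labels lang → Spec_count_num_islands labels lang (count_num_islands labels lang)

-- ===== LEMMAS AND PROOFS =====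

-- abstract: number of lang-runs in ls, given the previous element
def pvRuns (lang : String) (prev : Option String) : List String → Int
  | [] => 0
  | x :: xs => (if x = lang ∧ prev ≠ some lang then 1 else 0) + pvRuns lang (some x) xs

-- B's collapse-then-count equals count so far + pvRuns continuing from acc's last element
lemma stepB_inv (lang : String) : ∀ (ls acc : List String),
    ((ls.foldl pvStepB acc).count lang : Int)
    = (acc.count lang : Int) + pvRuns lang acc.getLast? ls := by
  intro ls
  induction ls with
  | nil => intro acc; simp [pvRuns]
  | cons x xs ih =>
    intro acc
    simp only [List.foldl, pvRuns]
    by_cases hrep : acc.getLast? = some x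
    · -- acc nonempty, last = x: skip
      have hne : acc ≠ [] := by intro h; simp [h] at hrep
      have hl : 0 < acc.length := List.length_pos_of_ne_nil hne
      have hget : ((if 1 ≤ acc.length then some (acc.length - 1) else none).bind
          fun a => acc[a]?) = acc.getLast? := by
        rw [if_pos (by omega : 1 ≤ acc.length)]
        simp [List.getLast?_eq_getElem?]
      have hstep : pvStepB acc x = acc := by
        simp [pvStepB, hne, PySem.List.pyGet?, PySem.List.pyIdx?, hget, hrep]
      rw [hstep, ih acc]
      have hx : ¬ (x = lang ∧ acc.getLast? ≠ some lang) := by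
        rintro ⟨h1, h2⟩; exact h2 (h1 ▸ hrep)
      simp [hrep]
    · -- append x
      have hstep : pvStepB acc x = acc ++ [x] := by
        by_cases hne : acc = []
        · simp [pvStepB, hne]
        · have hl : 0 < acc.length := List.length_pos_of_ne_nil hne
          have hget : ((if 1 ≤ acc.length then some (acc.length - 1) else none).bind
              fun a => acc[a]?) = acc.getLast? := by
            rw [if_pos (by omega : 1 ≤ acc.length)]
            simp [List.getLast?_eq_getElem?]
          simp [pvStepB, hne, PySem.List.pyGet?, PySem.List.pyIdx?, hget, hrep]
      rw [hstep, ih (acc ++ [x])]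
      simp only [List.count_append, List.getLast?_append]
      by_cases hx : x = lang
      · have hprev : acc.getLast? ≠ some lang := fun h => hrep (hx ▸ h)
        simp [hx, hprev]
        ring
      · simp [hx]

-- A's fold from a consistent state finishes at count + (1 if a run is open) + pvRuns
lemma stepA_inv (lang : String) : ∀ (ls : List String) (count : Int) (curr prev : Option String),
    (curr = none ∨ curr = some lang) → (curr = some lang ↔ prev = some lang) →
    (let s := ls.foldl (pvStepA lang) (count, curr)
     if s.2 = some lang then s.1 + 1 else s.1)
    = count + (if curr = some lang then 1 else 0) + pvRuns lang prev ls := by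
  intro ls
  induction ls with
  | nil =>
    intro count curr prev hc hiff
    rcases hc with h | h <;> simp [h, pvRuns]
  | cons x xs ih =>
    intro count curr prev hc hiff
    simp only [List.foldl, pvRuns]
    by_cases hx : x = lang
    · rcases hc with h | h
      · have hprev : prev ≠ some lang := by
          intro hp
          have := hiff.mpr hp
          simp [h] at this
        rw [show pvStepA lang (count, curr) x = (count, some lang) by
              simp [pvStepA, hx, h]]
        rw [ih count (some lang) (some x) (Or.inr rfl) (by simp [hx])]
        simp [h, hx, hprev]
        ring
      · have hprev : prev = some lang := hiff.mp h
        rw [show pvStepA lang (count, curr) x = (count, some lang) by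
              simp [pvStepA, hx, h]]
        rw [ih count (some lang) (some x) (Or.inr rfl) (by simp [hx])]
        simp [h, hx, hprev]
    · rcases hc with h | h
      · rw [show pvStepA lang (count, curr) x = (count, curr) by
              simp [pvStepA, hx, h]]
        rw [ih count curr (some x) (Or.inl h) (by simp [h, hx])]
        simp [h, hx]
      · rw [show pvStepA lang (count, curr) x = (count + 1, none) by
              simp [pvStepA, hx, h]]
        rw [ih (count + 1) none (some x) (Or.inl rfl) (by simp [hx])]
        simp [h, hx]

-- ===== VERDICT (by name: the statement is the Claim_ definition above) =====
theorem count_num_islands_spec : Claim_equal_count_num_islands := by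
  intro labels lang _
  show count_num_islands labels lang = count_num_islands_alt labels lang
  unfold count_num_islands count_num_islands_alt
  rw [stepA_inv lang labels 0 none none (Or.inl rfl) (by simp)]
  rw [show PySem.List.count (labels.foldl pvStepB []) lang
        = ((labels.foldl pvStepB []).count lang : Int) from by
      simp [PySem.List.count]]
  rw [stepB_inv lang labels []]
  simp
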